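-- pv_equiv track=rewrite | github.com/Ice-Moca/SNUCSE | HW2/AG_HW2_2023-12753/hw2.py | build_adjacency_array
-- ===== SOURCE A (Python) =====
-- def build_adjacency_array(vertex_count, edge_list):
--     # Get the number of edges
--     total_edges = len(edge_list)
--
--     # Compute degree for each vertex
--     degree_count = [0] * vertex_count
--     for source, _ in edge_list:
--         degree_count[source] += 1
--
--     # Compute prefix sums to determine end positions of vertices
--     prefix_degree = [0] * (vertex_count + 1)
--     for index in range(1, vertex_count + 1):
--         prefix_degree[index] = prefix_degree[index - 1] + degree_count[index - 1]
--
--     # Get the start position in array of each vertices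
--     index = prefix_degree[:-1].copy()
--
--     # Fill adjacency arrays
--     adjacency_array = [0] * total_edges
--     for source, target in edge_list:
--         adjacency_array[index[source]] = target
--         index[source] += 1
--
--     # Compute in-degree for transpose
--     in_degree_count = [0] * vertex_count
--     for _, target in edge_list:
--         in_degree_count[target] += 1
--
--     # Compute prefix sums for transpose
--     transpose_prefix = [0] * (vertex_count + 1)
--     for index in range(1, vertex_count + 1):
--         transpose_prefix[index] = transpose_prefix[index - 1] + in_degree_count[index - 1]
--
--     # Get the start position in array of each vertices for transpose
--     index_transpose = transpose_prefix[:-1].copy()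
--
--     # Fill transpose arrays
--     transpose_adjacency_array = [0] * total_edges
--     for source, target in edge_list:
--         transpose_adjacency_array[index_transpose[target]] = source
--         index_transpose[target] += 1
--
--     return (prefix_degree, adjacency_array), (transpose_prefix, transpose_adjacency_array)
-- ===== SOURCE B (Python) =====
-- def build_adjacency_array(vertex_count, edge_list):
--     # One pass: collect per-vertex buckets, then flatten with running prefix sums.
--     out_buckets = [[] for _ in range(vertex_count)]
--     in_buckets = [[] for _ in range(vertex_count)]
--     for source, target in edge_list:
--         out_buckets[source].append(target)
--         in_buckets[target].append(source)
--
--     prefix_degree = [0]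
--     adjacency_array = []
--     for bucket in out_buckets:
--         prefix_degree.append(prefix_degree[-1] + len(bucket))
--         adjacency_array.extend(bucket)
--
--     transpose_prefix = [0]
--     transpose_adjacency_array = []
--     for bucket in in_buckets:
--         transpose_prefix.append(transpose_prefix[-1] + len(bucket))
--         transpose_adjacency_array.extend(bucket)
--
--     return (prefix_degree, adjacency_array), (transpose_prefix, transpose_adjacency_array)
-- ===== Notes on version B (the rewrite author's own statement) =====
-- stated objective: simpler
-- what changed: Replaces the two-phase counting sort (degree count, prefix sums, cursor-array fill into a preallocated array) by a single bucketing pass into lists-of-lists followed by a flatten with running prefix sums.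
-- outside the precondition, e.g. on build_adjacency_array(-1, []): A returns (([], []), ([], [])), B returns (([0], []), ([0], []))
import Mathlib
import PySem

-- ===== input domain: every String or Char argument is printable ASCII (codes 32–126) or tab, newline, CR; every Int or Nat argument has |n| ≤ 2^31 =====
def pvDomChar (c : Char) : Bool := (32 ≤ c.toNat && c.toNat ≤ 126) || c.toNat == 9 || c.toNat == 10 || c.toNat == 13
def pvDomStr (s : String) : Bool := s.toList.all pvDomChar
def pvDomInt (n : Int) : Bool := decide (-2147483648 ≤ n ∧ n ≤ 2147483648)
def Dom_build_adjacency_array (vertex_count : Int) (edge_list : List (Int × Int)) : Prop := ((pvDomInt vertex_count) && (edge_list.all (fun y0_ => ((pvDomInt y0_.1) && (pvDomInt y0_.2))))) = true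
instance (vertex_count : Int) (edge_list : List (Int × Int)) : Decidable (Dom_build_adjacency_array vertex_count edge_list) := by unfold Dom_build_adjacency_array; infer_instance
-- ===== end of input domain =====

-- B replaces A's two-phase counting sort (degree counts, prefix sums, cursor fill) by one
-- bucketing pass into lists-of-lists followed by a flatten with running prefix sums (same cost).

-- ===== PORT A =====
def build_adjacency_array (vertex_count : Int) (edge_list : List (Int × Int)) : (List Int × List Int) × (List Int × List Int) :=
  let total_edges : Int := edge_list.length
  let degree_count := edge_list.foldl
    (fun dc e => PySem.List.pySetD dc e.1 (PySem.List.pyGetD dc e.1 0 + 1))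
    (List.replicate vertex_count.toNat (0 : Int))
  let prefix_degree := (PySem.List.pyRange 1 (vertex_count + 1) 1).foldl
    (fun pd i => PySem.List.pySetD pd i (PySem.List.pyGetD pd (i - 1) 0 + PySem.List.pyGetD degree_count (i - 1) 0))
    (List.replicate (vertex_count + 1).toNat (0 : Int))
  let index0 := PySem.List.slice prefix_degree none (some (-1))
  let fill := edge_list.foldl
    (fun st e => (PySem.List.pySetD st.1 (PySem.List.pyGetD st.2 e.1 0) e.2,
                  PySem.List.pySetD st.2 e.1 (PySem.List.pyGetD st.2 e.1 0 + 1)))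
    (List.replicate total_edges.toNat (0 : Int), index0)
  let in_degree_count := edge_list.foldl
    (fun dc e => PySem.List.pySetD dc e.2 (PySem.List.pyGetD dc e.2 0 + 1))
    (List.replicate vertex_count.toNat (0 : Int))
  let transpose_prefix := (PySem.List.pyRange 1 (vertex_count + 1) 1).foldl
    (fun pd i => PySem.List.pySetD pd i (PySem.List.pyGetD pd (i - 1) 0 + PySem.List.pyGetD in_degree_count (i - 1) 0))
    (List.replicate (vertex_count + 1).toNat (0 : Int))
  let indexT0 := PySem.List.slice transpose_prefix none (some (-1))
  let fillT := edge_list.foldl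
    (fun st e => (PySem.List.pySetD st.1 (PySem.List.pyGetD st.2 e.2 0) e.1,
                  PySem.List.pySetD st.2 e.2 (PySem.List.pyGetD st.2 e.2 0 + 1)))
    (List.replicate total_edges.toNat (0 : Int), indexT0)
  ((prefix_degree, fill.1), (transpose_prefix, fillT.1))

-- ===== PORT B =====
-- (Python B mutates inner bucket lists via .append; ported as replacing the bucket with its extension.)
def build_adjacency_array_alt (vertex_count : Int) (edge_list : List (Int × Int)) : (List Int × List Int) × (List Int × List Int) :=
  let buckets := edge_list.foldl
    (fun st e => (PySem.List.pySetD st.1 e.1 (PySem.List.pyGetD st.1 e.1 [] ++ [e.2]),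
                  PySem.List.pySetD st.2 e.2 (PySem.List.pyGetD st.2 e.2 [] ++ [e.1])))
    (List.replicate vertex_count.toNat ([] : List Int), List.replicate vertex_count.toNat ([] : List Int))
  let outp := buckets.1.foldl
    (fun st b => (st.1 ++ [PySem.List.pyGetD st.1 (-1) 0 + (b.length : Int)], st.2 ++ b))
    (([0] : List Int), ([] : List Int))
  let inp := buckets.2.foldl
    (fun st b => (st.1 ++ [PySem.List.pyGetD st.1 (-1) 0 + (b.length : Int)], st.2 ++ b))
    (([0] : List Int), ([] : List Int))
  (outp, inp)

-- ===== PRECONDITION & SPEC =====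
-- Pre_ excludes inputs where A raises IndexError (an edge endpoint outside [-vertex_count, vertex_count))
-- and negative vertex_count, a meaningless input on which A returns empty prefix arrays (only for an
-- empty edge list, raising otherwise) while B naturally returns the [0] prefix.
def Pre_build_adjacency_array (vertex_count : Int) (edge_list : List (Int × Int)) : Prop :=
  0 ≤ vertex_count ∧ ∀ e ∈ edge_list,
    -vertex_count ≤ e.1 ∧ e.1 < vertex_count ∧ -vertex_count ≤ e.2 ∧ e.2 < vertex_count
instance (vertex_count : Int) (edge_list : List (Int × Int)) : Decidable (Pre_build_adjacency_array vertex_count edge_list) := by unfold Pre_build_adjacency_array; infer_instance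

def pvWitness_build_adjacency_array : Int × (List (Int × Int)) := (3, [(0, 1), (1, 2), (-1, 0), (1, 0)])

def Spec_build_adjacency_array (vertex_count : Int) (edge_list : List (Int × Int)) (out : (List Int × List Int) × (List Int × List Int)) : Prop := out = build_adjacency_array_alt vertex_count edge_list
instance (vertex_count : Int) (edge_list : List (Int × Int)) (out : (List Int × List Int) × (List Int × List Int)) : Decidable (Spec_build_adjacency_array vertex_count edge_list out) := by unfold Spec_build_adjacency_array; infer_instance

-- ===== CLAIM (what is proved, stated in full; the proofs are below) =====
def Claim_equal_build_adjacency_array : Prop := ∀ (vertex_count : Int) (edge_list : List (Int × Int)), Dom_build_adjacency_array vertex_count edge_list → Pre_build_adjacency_array vertex_count edge_list → Spec_build_adjacency_array vertex_count edge_list (build_adjacency_array vertex_count edge_list)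

-- ===== LEMMAS AND PROOFS =====

-- normalized index of a Python in-range index (possibly negative)
def nrmIdx (n : Nat) (i : Int) : Nat := if 0 ≤ i then i.toNat else n - (-i).toNat

def InR (n : Nat) (i : Int) : Prop := -(n : Int) ≤ i ∧ i < (n : Int)

theorem nrmIdx_lt {n : Nat} {i : Int} (h : InR n i) : nrmIdx n i < n := by
  rcases h with ⟨h1, h2⟩; unfold nrmIdx; split <;> omega

theorem pyGetD_inr {α : Type} (xs : List α) {i : Int} (d : α) (h : InR xs.length i) :
    PySem.List.pyGetD xs i d = xs.getD (nrmIdx xs.length i) d := by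
  rcases h with ⟨h1, h2⟩
  simp only [PySem.List.pyGetD, PySem.List.pyGet?, PySem.List.pyIdx?, nrmIdx]
  by_cases h0 : 0 ≤ i
  · simp [h0, h2, List.getD_eq_getElem?_getD]
  · simp [h0, h1, List.getD_eq_getElem?_getD]

theorem pySetD_inr {α : Type} (xs : List α) {i : Int} (v : α) (h : InR xs.length i) :
    PySem.List.pySetD xs i v = xs.set (nrmIdx xs.length i) v := by
  rcases h with ⟨h1, h2⟩
  simp only [PySem.List.pySetD, PySem.List.pySet?, PySem.List.pyIdx?, nrmIdx]
  by_cases h0 : 0 ≤ i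
  · simp [h0, h2]
  · simp [h0, h1]

-- getD at an in-bounds index is getElem
theorem getD_eq_getElem_of_lt {α : Type} (l : List α) (d : α) {j : Nat} (hj : j < l.length) :
    l.getD j d = l[j] := by
  rw [List.getD_eq_getElem?_getD, List.getElem?_eq_getElem hj]; rfl

-- the bucket step shared (after swapping) by B's single pass
def bstep (ob : List (List Int)) (e : Int × Int) : List (List Int) :=
  PySem.List.pySetD ob e.1 (PySem.List.pyGetD ob e.1 [] ++ [e.2])

theorem bstep_eq {ob : List (List Int)} {e : Int × Int} (h : InR ob.length e.1) :
    bstep ob e = ob.set (nrmIdx ob.length e.1) (ob.getD (nrmIdx ob.length e.1) [] ++ [e.2]) := by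
  unfold bstep; rw [pyGetD_inr _ _ h, pySetD_inr _ _ h]

theorem length_bstep (ob : List (List Int)) (e : Int × Int) : (bstep ob e).length = ob.length := by
  simp [bstep, PySem.List.length_pySetD]

theorem length_foldl_bstep (el : List (Int × Int)) (ob : List (List Int)) :
    (el.foldl bstep ob).length = ob.length := by
  induction el generalizing ob with
  | nil => rfl
  | cons e el ih => simp [List.foldl_cons, ih, length_bstep]

-- each bucket only grows along the fold
theorem getD_prefix_foldl_bstep (el : List (Int × Int)) (ob : List (List Int)) (v : Nat)
    (hel : ∀ e ∈ el, InR ob.length e.1) :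
    ob.getD v [] <+: (el.foldl bstep ob).getD v [] := by
  induction el generalizing ob with
  | nil => exact List.prefix_refl _
  | cons e el ih =>
      have he := hel e (by simp)
      have hstep : ob.getD v [] <+: (bstep ob e).getD v [] := by
        rw [bstep_eq he]
        by_cases hv : v = nrmIdx ob.length e.1
        · subst hv
          simp only [List.getD_eq_getElem?_getD]
          rw [List.getElem?_set_self (nrmIdx_lt he)]
          exact List.prefix_append _ _
        · simp only [List.getD_eq_getElem?_getD]
          rw [List.getElem?_set_ne (by omega)]
      refine hstep.trans ?_
      exact ih (bstep ob e) (by intro x hx; rw [length_bstep]; exact hel x (by simp [hx]))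

-- degree counting is the image of bucketing under length
theorem degree_eq (el : List (Int × Int)) (ob : List (List Int))
    (hel : ∀ e ∈ el, InR ob.length e.1) :
    el.foldl (fun dc e => PySem.List.pySetD dc e.1 (PySem.List.pyGetD dc e.1 0 + 1))
      (ob.map (fun b => (b.length : Int)))
    = (el.foldl bstep ob).map (fun b => (b.length : Int)) := by
  induction el generalizing ob with
  | nil => rfl
  | cons e el ih =>
      have he := hel e (by simp)
      have hlen : (ob.map (fun b => (b.length : Int))).length = ob.length := by simp
      rw [List.foldl_cons, List.foldl_cons]
      have hstep : PySem.List.pySetD (ob.map (fun b => (b.length : Int))) e.1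
            (PySem.List.pyGetD (ob.map (fun b => (b.length : Int))) e.1 0 + 1)
          = (bstep ob e).map (fun b => (b.length : Int)) := by
        rw [pySetD_inr _ _ (by rw [hlen]; exact he), pyGetD_inr _ _ (by rw [hlen]; exact he),
            bstep_eq he, hlen]
        rw [List.map_set]
        congr 1
        have hk := nrmIdx_lt he
        simp [List.getD_eq_getElem?_getD, List.getElem?_map, List.getElem?_eq_getElem hk]
      rw [hstep]
      exact ih (bstep ob e) (by intro x hx; rw [length_bstep]; exact hel x (by simp [hx]))

-- prefix sums
def psum (xs : List Int) : List Int := (List.range (xs.length + 1)).map (fun j => (xs.take j).sum)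

theorem psum_append_singleton (xs : List Int) (x : Int) :
    psum (xs ++ [x]) = psum xs ++ [xs.sum + x] := by
  unfold psum
  rw [List.length_append, List.length_singleton, List.range_succ, List.map_append]
  congr 1
  · refine List.map_congr_left ?_
    intro j hj
    rw [List.mem_range] at hj
    rw [List.take_append_of_le_length (by omega)]
  · simp

theorem pyGetD_psum_neg_one (xs : List Int) (d : Int) :
    PySem.List.pyGetD (psum xs) (-1) d = xs.sum := by
  unfold psum
  rw [List.range_succ, List.map_append]
  simp [PySem.List.pyGetD_neg_one_append_singleton]

theorem map_range_set {α : Type} (m : Nat) (f : Nat → α) (j : Nat) (hj : j < m) (x : α) :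
    ((List.range m).map f).set j x = (List.range m).map (fun i => if i = j then x else f i) := by
  apply List.ext_getElem
  · simp
  · intro k h1 h2
    simp only [List.getElem_set, List.getElem_map, List.getElem_range]
    by_cases hkj : k = j
    · subst hkj; simp
    · rw [if_neg (by omega), if_neg hkj]

-- A's prefix-sum loop computes running partial sums
theorem prefix_loop_aux (dc : List Int) (k : Nat) (hk : k ≤ dc.length) :
    (PySem.List.pyRange 1 ((k : Int) + 1) 1).foldl
      (fun pd i => PySem.List.pySetD pd i (PySem.List.pyGetD pd (i - 1) 0 + PySem.List.pyGetD dc (i - 1) 0))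
      (List.replicate (dc.length + 1) (0 : Int))
    = (List.range (dc.length + 1)).map (fun j => if j ≤ k then (dc.take j).sum else 0) := by
  induction k with
  | zero =>
      rw [show ((0 : Nat) : Int) + 1 = 1 by norm_num, PySem.List.pyRange_one_eq_nil (by norm_num),
          List.foldl_nil]
      apply List.ext_getElem (by simp)
      intro j h1 h2
      simp only [List.getElem_replicate, List.getElem_map, List.getElem_range]
      by_cases hj : j = 0
      · subst hj; simp
      · rw [if_neg (by omega)]
  | succ k ih =>
      have hk' : k ≤ dc.length := by omega
      have hklt : k < dc.length := by omega
      rw [show (((k + 1 : Nat)) : Int) + 1 = ((k : Int) + 1) + 1 by push_cast; ring]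
      rw [PySem.List.pyRange_one_succ_right (by omega)]
      rw [List.foldl_append, ih hk', List.foldl_cons, List.foldl_nil]
      rw [show ((k : Int) + 1) - 1 = ((k : Nat) : Int) by ring]
      rw [PySem.List.pyGetD_natCast, PySem.List.pyGetD_natCast]
      have hpd : ((List.range (dc.length + 1)).map (fun j => if j ≤ k then (dc.take j).sum else 0)).getD k 0
          = (dc.take k).sum := by
        rw [List.getD_eq_getElem?_getD, List.getElem?_map, List.getElem?_range (by omega)]
        simp
      rw [hpd]
      rw [show ((k : Int) + 1) = (((k + 1 : Nat)) : Int) by push_cast; ring, PySem.List.pySetD_natCast]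
      rw [map_range_set _ _ _ (by omega)]
      refine List.map_congr_left ?_
      intro j hj
      rw [List.mem_range] at hj
      by_cases hj1 : j = k + 1
      · subst hj1
        rw [if_pos rfl, if_pos (by omega)]
        rw [List.sum_take_succ dc k hklt]
        rw [getD_eq_getElem_of_lt dc 0 hklt]
      · rw [if_neg hj1]
        by_cases hj2 : j ≤ k
        · rw [if_pos hj2, if_pos (by omega)]
        · rw [if_neg hj2, if_neg (by omega)]

theorem prefix_loop (dc : List Int) :
    (PySem.List.pyRange 1 ((dc.length : Int) + 1) 1).foldl
      (fun pd i => PySem.List.pySetD pd i (PySem.List.pyGetD pd (i - 1) 0 + PySem.List.pyGetD dc (i - 1) 0))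
      (List.replicate (dc.length + 1) (0 : Int)) = psum dc := by
  rw [prefix_loop_aux dc dc.length le_rfl]
  unfold psum
  refine List.map_congr_left ?_
  intro j hj
  rw [List.mem_range] at hj
  rw [if_pos (by omega)]

-- B's flatten loop
theorem flatten_loop (bs : List (List Int)) :
    bs.foldl
      (fun st b => (st.1 ++ [PySem.List.pyGetD st.1 (-1) 0 + (b.length : Int)], st.2 ++ b))
      (([0] : List Int), ([] : List Int))
    = (psum (bs.map (fun b => (b.length : Int))), bs.flatten) := by
  induction bs using List.reverseRecOn with
  | nil => simp [psum]
  | append_singleton bs b ih =>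
      rw [List.foldl_append, ih, List.foldl_cons, List.foldl_nil, List.map_append]
      simp only [List.map_cons, List.map_nil]
      rw [psum_append_singleton, pyGetD_psum_neg_one]
      simp

-- fill-phase bookkeeping
def preSumN (fin : List (List Int)) (v : Nat) : Nat := ((fin.take v).map List.length).sum

def padB (cur fin : List (List Int)) : List (List Int) :=
  List.zipWith (fun c f => c ++ List.replicate (f.length - c.length) (0 : Int)) cur fin

def offs (cur fin : List (List Int)) : List Int :=
  (List.range cur.length).map (fun v => ((preSumN fin v + (cur.getD v []).length : Nat) : Int))

theorem padB_self (cur : List (List Int)) : padB cur cur = cur := by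
  unfold padB
  induction cur with
  | nil => rfl
  | cons c cs ih => simp [ih]

theorem pv_set_append_left {α : Type} (l₁ l₂ : List α) (n : Nat) (a : α) (h : n < l₁.length) :
    (l₁ ++ l₂).set n a = l₁.set n a ++ l₂ := by
  induction l₁ generalizing n with
  | nil => simp at h
  | cons b l ih =>
      cases n with
      | zero => rfl
      | succ n =>
          simp only [List.cons_append, List.set_cons_succ]
          rw [ih _ (by simpa using h)]

theorem pv_set_append_right {α : Type} (l₁ l₂ : List α) (n : Nat) (a : α) :
    (l₁ ++ l₂).set (l₁.length + n) a = l₁ ++ l₂.set n a := by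
  induction l₁ with
  | nil => simp
  | cons b l ih =>
      simp only [List.cons_append, List.length_cons]
      rw [show l.length + 1 + n = (l.length + n) + 1 by omega, List.set_cons_succ, ih]

theorem pv_set_append_len {α : Type} (l₁ l₂ : List α) (a : α) :
    (l₁ ++ l₂).set l₁.length a = l₁ ++ l₂.set 0 a := by
  simpa using pv_set_append_right l₁ l₂ 0 a

theorem flatten_set (bs : List (List Int)) : ∀ (v k : Nat) (x : Int),
    v < bs.length → k < (bs.getD v []).length →
    bs.flatten.set (preSumN bs v + k) x = (bs.set v ((bs.getD v []).set k x)).flatten := by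
  induction bs with
  | nil => intro v k x hv; simp at hv
  | cons b bs ih =>
      intro v k x hv hk
      cases v with
      | zero =>
          rw [show preSumN (b :: bs) 0 = 0 from rfl, Nat.zero_add]
          rw [List.getD_cons_zero] at hk ⊢
          rw [List.flatten_cons, pv_set_append_left _ _ _ _ hk, List.set_cons_zero, List.flatten_cons]
      | succ v =>
          have hv' : v < bs.length := by simpa using hv
          rw [List.getD_cons_succ] at hk ⊢
          have hps : preSumN (b :: bs) (v + 1) = b.length + preSumN bs v := by
            simp [preSumN, List.take_succ_cons]
          rw [hps, List.flatten_cons, Nat.add_assoc, pv_set_append_right, ih v k x hv' hk,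
              List.set_cons_succ, List.flatten_cons]

-- A's cursor fill, run against the final buckets
theorem fill_run (r : List (Int × Int)) : ∀ (cur : List (List Int)),
    (∀ e ∈ r, InR cur.length e.1) →
    r.foldl
      (fun st e => (PySem.List.pySetD st.1 (PySem.List.pyGetD st.2 e.1 0) e.2,
                    PySem.List.pySetD st.2 e.1 (PySem.List.pyGetD st.2 e.1 0 + 1)))
      ((padB cur (r.foldl bstep cur)).flatten, offs cur (r.foldl bstep cur))
    = ((r.foldl bstep cur).flatten, offs (r.foldl bstep cur) (r.foldl bstep cur)) := by
  induction r with
  | nil =>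
      intro cur _
      simp only [List.foldl_nil]
      rw [padB_self]
  | cons e r ih =>
      intro cur hel
      have he : InR cur.length e.1 := hel e (by simp)
      have hkklt : nrmIdx cur.length e.1 < cur.length := nrmIdx_lt he
      have hlen' : (bstep cur e).length = cur.length := length_bstep cur e
      have hel' : ∀ x ∈ r, InR (bstep cur e).length x.1 := by
        intro x hx; rw [hlen']; exact hel x (by simp [hx])
      set kk := nrmIdx cur.length e.1 with hkkdef
      simp only [List.foldl_cons]
      set fin := r.foldl bstep (bstep cur e) with hfin
      have hfinlen : fin.length = cur.length := by rw [hfin, length_foldl_bstep, hlen']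
      have hpre' : ∀ v, (bstep cur e).getD v [] <+: fin.getD v [] := by
        intro v; exact getD_prefix_foldl_bstep r (bstep cur e) v hel'
      have hbkk : (bstep cur e).getD kk [] = cur.getD kk [] ++ [e.2] := by
        rw [bstep_eq he]
        simp only [List.getD_eq_getElem?_getD]
        rw [List.getElem?_set_self hkklt]
        rfl
      have hbne : ∀ v, v ≠ kk → (bstep cur e).getD v [] = cur.getD v [] := by
        intro v hv
        rw [bstep_eq he]
        simp only [List.getD_eq_getElem?_getD]
        rw [List.getElem?_set_ne (by omega)]
      have hpre : ∀ v, cur.getD v [] <+: fin.getD v [] := by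
        intro v
        by_cases hv : v = kk
        · rw [hv]
          refine List.IsPrefix.trans (List.prefix_append _ [e.2]) ?_
          rw [← hbkk]; exact hpre' kk
        · rw [← hbne v hv]; exact hpre' v
      have hlenle : ∀ v, (cur.getD v []).length ≤ (fin.getD v []).length :=
        fun v => (hpre v).length_le
      have hckk : (cur.getD kk []).length < (fin.getD kk []).length := by
        have h := (hpre' kk).length_le
        rw [hbkk] at h
        simp only [List.length_append, List.length_singleton] at h
        omega
      have hpadlen : (padB cur fin).length = cur.length := by
        simp [padB, hfinlen]
      have hmaplen : (padB cur fin).map List.length = fin.map List.length := by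
        apply List.ext_getElem
        · simp [padB, hfinlen]
        · intro j h1 h2
          have hj1 : j < cur.length := by simp [padB, hfinlen] at h1; omega
          simp only [padB, List.getElem_map, List.getElem_zipWith]
          have hle := hlenle j
          rw [getD_eq_getElem_of_lt cur [] hj1,
              getD_eq_getElem_of_lt fin [] (by rw [hfinlen]; exact hj1)] at hle
          simp only [List.length_append, List.length_replicate]
          omega
      have hpresum : ∀ v, preSumN (padB cur fin) v = preSumN fin v := by
        intro v; unfold preSumN
        rw [List.map_take, List.map_take, hmaplen]
      have hofflen : (offs cur fin).length = cur.length := by simp [offs]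
      have hIval : PySem.List.pyGetD (offs cur fin) e.1 0
          = ((preSumN fin kk + (cur.getD kk []).length : Nat) : Int) := by
        have hh : InR (offs cur fin).length e.1 := by rw [hofflen]; exact he
        rw [pyGetD_inr _ _ hh, hofflen]
        unfold offs
        rw [List.getD_eq_getElem?_getD, List.getElem?_map, List.getElem?_range hkklt]
        rfl
      have hblock : (padB cur fin).getD kk []
          = cur.getD kk [] ++ List.replicate ((fin.getD kk []).length - (cur.getD kk []).length) (0 : Int) := by
        rw [List.getD_eq_getElem?_getD, List.getElem?_eq_getElem (by rw [hpadlen]; exact hkklt)]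
        simp only [padB, List.getElem_zipWith, Option.getD_some]
        rw [getD_eq_getElem_of_lt cur [] hkklt, getD_eq_getElem_of_lt fin [] (by rw [hfinlen]; exact hkklt)]
      have hbset : ((padB cur fin).getD kk []).set (cur.getD kk []).length e.2
          = (cur.getD kk [] ++ [e.2]) ++ List.replicate ((fin.getD kk []).length - ((cur.getD kk []).length + 1)) (0 : Int) := by
        rw [hblock]
        obtain ⟨m, hm⟩ : ∃ m, (fin.getD kk []).length - (cur.getD kk []).length = m + 1 :=
          ⟨(fin.getD kk []).length - (cur.getD kk []).length - 1, by omega⟩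
        rw [hm, pv_set_append_len, List.replicate_succ, List.set_cons_zero, List.append_cons]
        rw [show m = (fin.getD kk []).length - ((cur.getD kk []).length + 1) by omega]
      have hsetpad : (padB cur fin).set kk (((padB cur fin).getD kk []).set (cur.getD kk []).length e.2)
          = padB (bstep cur e) fin := by
        apply List.ext_getElem
        · simp [padB, hfinlen, hlen']
        · intro j h1 h2
          have hj : j < cur.length := by
            simp [padB, hfinlen] at h1; omega
          rw [List.getElem_set]
          by_cases hjk : kk = j
          · rw [if_pos hjk]
            subst hjk
            rw [hbset]
            simp only [padB, List.getElem_zipWith]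
            rw [← getD_eq_getElem_of_lt (bstep cur e) [] (by rw [hlen']; exact hj),
                ← getD_eq_getElem_of_lt fin [] (by rw [hfinlen]; exact hj)]
            rw [hbkk]
            simp only [List.length_append, List.length_singleton]
          · rw [if_neg hjk]
            simp only [padB, List.getElem_zipWith]
            rw [← getD_eq_getElem_of_lt cur [] hj,
                ← getD_eq_getElem_of_lt fin [] (by rw [hfinlen]; exact hj),
                ← getD_eq_getElem_of_lt (bstep cur e) [] (by rw [hlen']; exact hj)]
            rw [hbne j (by omega)]
      have harr : PySem.List.pySetD (padB cur fin).flatten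
            (PySem.List.pyGetD (offs cur fin) e.1 0) e.2
          = (padB (bstep cur e) fin).flatten := by
        rw [hIval, PySem.List.pySetD_natCast, ← hpresum kk]
        rw [flatten_set (padB cur fin) kk (cur.getD kk []).length e.2
            (by rw [hpadlen]; exact hkklt)
            (by rw [hblock]; simp only [List.length_append, List.length_replicate]; omega)]
        rw [hsetpad]
      have hIupd : PySem.List.pySetD (offs cur fin) e.1 (PySem.List.pyGetD (offs cur fin) e.1 0 + 1)
          = offs (bstep cur e) fin := by
        have hh : InR (offs cur fin).length e.1 := by rw [hofflen]; exact he
        rw [hIval, pySetD_inr _ _ hh, hofflen]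
        unfold offs
        rw [map_range_set _ _ _ hkklt, hlen']
        refine List.map_congr_left ?_
        intro j hj
        rw [List.mem_range] at hj
        by_cases hjk : j = kk
        · subst hjk
          rw [if_pos rfl, hbkk]
          simp only [List.length_append, List.length_singleton]
          push_cast
          ring
        · rw [if_neg hjk, hbne j hjk]
      rw [harr, hIupd]
      exact ih (bstep cur e) hel'

-- initial-state bridges
theorem sum_set_nat (l : List Nat) (i : Nat) (a : Nat) (h : i < l.length) :
    (l.set i a).sum + l.getD i 0 = l.sum + a := by
  induction l generalizing i with
  | nil => simp at h
  | cons b l ih =>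
      cases i with
      | zero => simp [List.getD_cons_zero]; omega
      | succ i =>
          simp only [List.set_cons_succ, List.sum_cons, List.getD_cons_succ]
          have := ih i (by simpa using h)
          omega

theorem sum_len_foldl_bstep (r : List (Int × Int)) : ∀ (cur : List (List Int)),
    (∀ e ∈ r, InR cur.length e.1) →
    ((r.foldl bstep cur).map List.length).sum = (cur.map List.length).sum + r.length := by
  induction r with
  | nil => intro cur _; simp
  | cons e r ih =>
      intro cur hel
      have he := hel e (by simp)
      have hk := nrmIdx_lt he
      rw [List.foldl_cons, ih (bstep cur e) (by intro x hx; rw [length_bstep]; exact hel x (by simp [hx]))]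
      have hgd : (cur.map List.length).getD (nrmIdx cur.length e.1) 0
          = (cur.getD (nrmIdx cur.length e.1) []).length := by
        rw [getD_eq_getElem_of_lt _ _ (by simpa using hk), getD_eq_getElem_of_lt _ _ hk]
        simp
      have hs := sum_set_nat (cur.map List.length) (nrmIdx cur.length e.1)
        ((cur.getD (nrmIdx cur.length e.1) []).length + 1) (by simpa using hk)
      rw [bstep_eq he, List.map_set]
      rw [show (cur.getD (nrmIdx cur.length e.1) [] ++ [e.2]).length
            = (cur.getD (nrmIdx cur.length e.1) []).length + 1 by simp]
      rw [List.length_cons]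
      omega

theorem pad_init (fin : List (List Int)) :
    padB (List.replicate fin.length []) fin = fin.map (fun f => List.replicate f.length (0 : Int)) := by
  unfold padB
  induction fin with
  | nil => rfl
  | cons f fs ih =>
      rw [List.length_cons, List.replicate_succ]
      simp only [List.zipWith_cons_cons, List.map_cons]
      rw [ih]
      simp

theorem flatten_map_replicate (fin : List (List Int)) :
    (fin.map (fun f => List.replicate f.length (0 : Int))).flatten
      = List.replicate ((fin.map List.length).sum) (0 : Int) := by
  induction fin with
  | nil => rfl
  | cons f fs ih =>
      rw [List.map_cons, List.flatten_cons, ih, List.map_cons, List.sum_cons, List.replicate_add]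

theorem offs_init (fin : List (List Int)) :
    (psum (fin.map (fun b => (b.length : Int)))).dropLast
      = offs (List.replicate fin.length []) fin := by
  unfold psum offs
  rw [List.length_map, List.length_replicate, List.range_succ, List.map_append]
  simp only [List.map_cons, List.map_nil]
  rw [List.dropLast_concat]
  refine List.map_congr_left ?_
  intro j hj
  rw [List.mem_range] at hj
  rw [List.getD_replicate _ hj]
  simp only [List.length_nil, Nat.add_zero]
  unfold preSumN
  rw [← List.map_take, Nat.cast_list_sum, List.map_map]
  rfl

-- the half-result: out-side of A equals out-side of B, for any edge list with in-range first components
theorem half_result (n : Nat) (el : List (Int × Int)) (hel : ∀ e ∈ el, InR n e.1) :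
    ((PySem.List.pyRange 1 ((n : Int) + 1) 1).foldl
        (fun pd i => PySem.List.pySetD pd i (PySem.List.pyGetD pd (i - 1) 0 +
          PySem.List.pyGetD (el.foldl (fun dc e => PySem.List.pySetD dc e.1 (PySem.List.pyGetD dc e.1 0 + 1)) (List.replicate n (0 : Int))) (i - 1) 0))
        (List.replicate (n + 1) (0 : Int)),
     (el.foldl
        (fun st e => (PySem.List.pySetD st.1 (PySem.List.pyGetD st.2 e.1 0) e.2,
                      PySem.List.pySetD st.2 e.1 (PySem.List.pyGetD st.2 e.1 0 + 1)))
        (List.replicate el.length (0 : Int),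
         PySem.List.slice
           ((PySem.List.pyRange 1 ((n : Int) + 1) 1).foldl
              (fun pd i => PySem.List.pySetD pd i (PySem.List.pyGetD pd (i - 1) 0 +
                PySem.List.pyGetD (el.foldl (fun dc e => PySem.List.pySetD dc e.1 (PySem.List.pyGetD dc e.1 0 + 1)) (List.replicate n (0 : Int))) (i - 1) 0))
              (List.replicate (n + 1) (0 : Int)))
           none (some (-1)))).1)
    = (el.foldl bstep (List.replicate n [])).foldl
        (fun st b => (st.1 ++ [PySem.List.pyGetD st.1 (-1) 0 + (b.length : Int)], st.2 ++ b))
        (([0] : List Int), ([] : List Int)) := by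
  have hrep : (List.replicate n ([] : List Int)).map (fun b => (b.length : Int))
      = List.replicate n (0 : Int) := by simp
  have helr : ∀ e ∈ el, InR (List.replicate n ([] : List Int)).length e.1 := by
    simpa using hel
  set OB := el.foldl bstep (List.replicate n ([] : List Int)) with hOB
  have hOBlen : OB.length = n := by rw [hOB, length_foldl_bstep, List.length_replicate]
  have hdeg : el.foldl (fun dc e => PySem.List.pySetD dc e.1 (PySem.List.pyGetD dc e.1 0 + 1))
        (List.replicate n (0 : Int))
      = OB.map (fun b => (b.length : Int)) := by
    rw [← hrep]; exact degree_eq el _ helr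
  have hdlen : (OB.map (fun b => (b.length : Int))).length = n := by simp [hOBlen]
  rw [hdeg]
  have hprefix := prefix_loop (OB.map (fun b => (b.length : Int)))
  rw [hdlen] at hprefix
  rw [hprefix]
  rw [PySem.List.slice_to_neg_one]
  have hidx : (psum (OB.map (fun b => (b.length : Int)))).dropLast
      = offs (List.replicate n ([] : List Int)) OB := by
    rw [offs_init, hOBlen]
  rw [hidx]
  have harr0 : List.replicate el.length (0 : Int) = (padB (List.replicate n ([] : List Int)) OB).flatten := by
    rw [show List.replicate n ([] : List Int) = List.replicate OB.length ([] : List Int) by rw [hOBlen]]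
    rw [pad_init, flatten_map_replicate]
    congr 1
    have hsum := sum_len_foldl_bstep el (List.replicate n ([] : List Int)) helr
    rw [← hOB] at hsum
    simp at hsum
    omega
  rw [harr0]
  rw [fill_run el (List.replicate n ([] : List Int)) helr]
  rw [flatten_loop OB]

-- ===== VERDICT (by name: the statement is the Claim_ definition above) =====
theorem build_adjacency_array_spec : Claim_equal_build_adjacency_array := by
  intro vc el _ hpre
  obtain ⟨hvc, hel⟩ := hpre
  obtain ⟨n, rfl⟩ : ∃ n : Nat, vc = (n : Int) := ⟨vc.toNat, (Int.toNat_of_nonneg hvc).symm⟩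
  have hel1 : ∀ e ∈ el, InR n e.1 := fun e he => ⟨(hel e he).1, (hel e he).2.1⟩
  have hel2 : ∀ e ∈ el.map Prod.swap, InR n e.1 := by
    intro e he
    rw [List.mem_map] at he
    obtain ⟨x, hx, rfl⟩ := he
    exact ⟨(hel x hx).2.2.1, (hel x hx).2.2.2⟩
  unfold Spec_build_adjacency_array
  simp only [build_adjacency_array, build_adjacency_array_alt]
  rw [show ((n : Int) + 1).toNat = n + 1 by omega]
  rw [show ((n : Int)).toNat = n by omega]
  rw [show ((el.length : Int)).toNat = el.length by omega]
  rw [PySem.List.foldl_prod_mk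
      (f := fun ob (e : Int × Int) => PySem.List.pySetD ob e.1 (PySem.List.pyGetD ob e.1 [] ++ [e.2]))
      (g := fun ib (e : Int × Int) => PySem.List.pySetD ib e.2 (PySem.List.pyGetD ib e.2 [] ++ [e.1]))]
  dsimp only
  have hswapdeg :
      el.foldl (fun dc e => PySem.List.pySetD dc e.2 (PySem.List.pyGetD dc e.2 0 + 1))
        (List.replicate n (0 : Int))
      = (el.map Prod.swap).foldl (fun dc e => PySem.List.pySetD dc e.1 (PySem.List.pyGetD dc e.1 0 + 1))
        (List.replicate n (0 : Int)) := by
    rw [List.foldl_map]; rfl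
  have hswapfill : ∀ (init : List Int × List Int),
      el.foldl (fun st e => (PySem.List.pySetD st.1 (PySem.List.pyGetD st.2 e.2 0) e.1,
                             PySem.List.pySetD st.2 e.2 (PySem.List.pyGetD st.2 e.2 0 + 1))) init
      = (el.map Prod.swap).foldl (fun st e => (PySem.List.pySetD st.1 (PySem.List.pyGetD st.2 e.1 0) e.2,
                             PySem.List.pySetD st.2 e.1 (PySem.List.pyGetD st.2 e.1 0 + 1))) init := by
    intro init; rw [List.foldl_map]; rfl
  have hswapbkt :
      el.foldl (fun ib (e : Int × Int) => PySem.List.pySetD ib e.2 (PySem.List.pyGetD ib e.2 [] ++ [e.1]))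
        (List.replicate n ([] : List Int))
      = (el.map Prod.swap).foldl bstep (List.replicate n ([] : List Int)) := by
    rw [List.foldl_map]; rfl
  have hbsteplam : (fun ob (e : Int × Int) => PySem.List.pySetD ob e.1 (PySem.List.pyGetD ob e.1 [] ++ [e.2])) = bstep := rfl
  rw [hswapdeg, hswapfill, hswapbkt, hbsteplam]
  have h1 := half_result n el hel1
  have h2 := half_result n (el.map Prod.swap) hel2
  rw [List.length_map] at h2
  rw [Prod.mk.injEq]
  exact ⟨h1, h2⟩
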